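-- pv_equiv track=rewrite | github.com/4dn-dcic/Submit4DN | wranglertools/fdnDCIC.py | move_to_front
-- ===== SOURCE A (Python) =====
-- move_front = ['experiment_set', '*tec_rep_no', '*bio_rep_no', '*replicate_set',
--               'description', 'title', '*title', 'name', '*name', 'aliases', '#Field Name:']
--
-- def move_to_front(list_names):
--     """Move names front"""
--     for front in move_front:
--         try:
--             list_names.remove(front)
--             list_names.insert(0, front)
--         except:  # pragma: no cover
--             pass
--     return list_names
-- ===== SOURCE B (Python) =====
-- move_front = ['experiment_set', '*tec_rep_no', '*bio_rep_no', '*replicate_set',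
--               'description', 'title', '*title', 'name', '*name', 'aliases', '#Field Name:']
--
-- def move_to_front(list_names):
--     """Move names front"""
--     fronts = [f for f in move_front if f in list_names]
--     counts = {f: 1 for f in fronts}
--     rest = []
--     for x in list_names:
--         c = counts.get(x, 0)
--         if c > 0:
--             counts[x] = c - 1
--         else:
--             rest.append(x)
--     list_names[:] = list(reversed(fronts)) + rest
--     return list_names
-- ===== Notes on version B (the rewrite author's own statement) =====
-- stated objective: alternative
-- what changed: Replaces A's eleven remove+insert passes over the list with one membership filter and a single counted partition pass that skips exactly the first occurrence of each present front name, then prepends the reversed fronts.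
import Mathlib
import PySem

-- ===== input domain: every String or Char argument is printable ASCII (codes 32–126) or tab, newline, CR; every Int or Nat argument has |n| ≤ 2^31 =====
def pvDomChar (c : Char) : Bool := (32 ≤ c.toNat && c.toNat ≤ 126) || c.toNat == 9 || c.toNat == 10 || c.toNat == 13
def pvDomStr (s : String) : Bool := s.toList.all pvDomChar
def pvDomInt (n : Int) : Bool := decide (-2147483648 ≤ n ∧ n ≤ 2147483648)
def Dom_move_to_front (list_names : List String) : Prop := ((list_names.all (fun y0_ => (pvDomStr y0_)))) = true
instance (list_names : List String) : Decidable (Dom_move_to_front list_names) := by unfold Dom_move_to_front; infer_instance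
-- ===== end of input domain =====

-- B replaces A's repeated remove+insert passes by a single counted partition pass (objective: simpler/alternative);
-- both A and B mutate the argument in place in Python — the equivalence proved here is about the RETURN value only.

-- shared module constant
def move_front : List String := ["experiment_set", "*tec_rep_no", "*bio_rep_no", "*replicate_set",
  "description", "title", "*title", "name", "*name", "aliases", "#Field Name:"]

-- ===== PORT A =====
-- try: remove; insert(0, ·); except: pass  — remove? = none means ValueError, so the state is kept
def pvStepA (cur : List String) (front : String) : List String :=
  match PySem.List.remove? cur front with
  | some removed => PySem.List.insert removed 0 front
  | none => cur

def move_to_front (list_names : List String) : List String :=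
  move_front.foldl pvStepA list_names

-- ===== PORT B =====
def move_to_front_alt (list_names : List String) : List String :=
  let fronts := move_front.filter (fun f => list_names.contains f)
  let counts := fronts.foldl (fun d f => d.insert f 1) (PySem.Dict.empty : PySem.Dict String Int)
  let st := list_names.foldl
    (fun (st : PySem.Dict String Int × List String) x =>
      let c := st.1.getD x 0
      if c > 0 then (st.1.insert x (c - 1), st.2) else (st.1, st.2 ++ [x]))
    (counts, ([] : List String))
  fronts.reverse ++ st.2

-- ===== PRECONDITION & SPEC =====
def Spec_move_to_front (list_names : List String) (out : List String) : Prop := out = move_to_front_alt list_names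
instance (list_names : List String) (out : List String) : Decidable (Spec_move_to_front list_names out) := by unfold Spec_move_to_front; infer_instance

-- ===== CLAIM (what is proved, stated in full; the proofs are below) =====
def Claim_equal_move_to_front : Prop := ∀ (list_names : List String), Dom_move_to_front list_names → Spec_move_to_front list_names (move_to_front list_names)

-- ===== LEMMAS AND PROOFS =====

theorem pvStepA_eq (cur : List String) (f : String) :
    pvStepA cur f = if f ∈ cur then f :: cur.erase f else cur := by
  unfold pvStepA
  by_cases h : f ∈ cur
  · rw [PySem.List.remove?_eq_some_erase cur f h]
    simp [PySem.List.insert_zero, h]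
  · rw [(PySem.List.remove?_eq_none_iff cur f).mpr h]
    simp [h]

-- erasing elements all different from the head leaves the head in place
theorem foldl_erase_cons (S : List String) (x : String) (xs : List String)
    (h : ∀ s ∈ S, s ≠ x) :
    S.foldl List.erase (x :: xs) = x :: S.foldl List.erase xs := by
  induction S generalizing xs with
  | nil => rfl
  | cons s S ih =>
    have hs : s ≠ x := h s (by simp)
    simp only [List.foldl_cons]
    rw [List.erase_cons_tail (by simp [hs.symm])]
    exact ih _ (fun t ht => h t (by simp [ht]))

theorem foldl_erase_nil (S : List String) : S.foldl List.erase ([] : List String) = [] := by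
  induction S with
  | nil => rfl
  | cons s S ih => simpa using ih

theorem foldl_erase_of_mem (S : List String) (x : String) (xs : List String)
    (hnd : S.Nodup) (hx : x ∈ S) :
    S.foldl List.erase (x :: xs) = (S.erase x).foldl List.erase xs := by
  induction S generalizing xs with
  | nil => cases hx
  | cons s S ih =>
    by_cases hsx : s = x
    · subst hsx
      simp [List.erase_cons_head]
    · have hxS : x ∈ S := by
        rcases List.mem_cons.mp hx with h | h
        · exact absurd h.symm hsx
        · exact h
      simp only [List.foldl_cons]
      rw [List.erase_cons_tail (by simp [Ne.symm hsx]),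
          List.erase_cons_tail (by simp [hsx])]
      simp only [List.foldl_cons]
      exact ih _ hnd.of_cons hxS

-- A's fold = (present fronts, reversed) ++ one first-occurrence erasure per front
theorem foldA (ms : List String) (l : List String) (hnd : ms.Nodup) :
    ms.foldl pvStepA l = (ms.filter (fun f => l.contains f)).reverse ++ ms.foldl List.erase l := by
  induction ms generalizing l with
  | nil => rfl
  | cons m ms ih =>
    have hmms : m ∉ ms := (List.nodup_cons.mp hnd).1
    simp only [List.foldl_cons, List.filter_cons, pvStepA_eq]
    by_cases hm : m ∈ l
    · simp only [hm, if_pos, List.contains_iff_mem]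
      rw [ih _ hnd.of_cons]
      have hfe : ms.foldl List.erase (m :: l.erase m) = m :: ms.foldl List.erase (l.erase m) :=
        foldl_erase_cons ms m _ (fun s hs => fun h => hmms (h ▸ hs))
      have hfc : ms.filter (fun f => (m :: l.erase m).contains f) = ms.filter (fun f => l.contains f) := by
        apply List.filter_congr
        intro f hf
        have hfm : f ≠ m := fun h => hmms (h ▸ hf)
        simp [List.mem_erase_of_ne hfm, hfm]
      rw [hfe, hfc]
      simp
    · simp only [hm, List.contains_iff_mem, decide_false, if_neg, Bool.false_eq_true,
        not_false_eq_true, List.erase_of_not_mem hm]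
      exact ih _ hnd.of_cons

-- erasing absent elements is a no-op, so only the present fronts matter
theorem foldl_erase_filter (ms : List String) (l : List String) (hnd : ms.Nodup) :
    ms.foldl List.erase l = (ms.filter (fun f => l.contains f)).foldl List.erase l := by
  induction ms generalizing l with
  | nil => rfl
  | cons m ms ih =>
    have hmms : m ∉ ms := (List.nodup_cons.mp hnd).1
    simp only [List.foldl_cons, List.filter_cons]
    by_cases hm : m ∈ l
    · simp only [List.contains_iff_mem, hm, if_pos, List.foldl_cons]
      rw [ih _ hnd.of_cons]
      congr 1
      apply List.filter_congr
      intro f hf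
      have hfm : f ≠ m := fun h => hmms (h ▸ hf)
      simp [List.mem_erase_of_ne hfm]
    · simp only [List.contains_iff_mem, hm, decide_false, Bool.false_eq_true, if_neg,
        not_false_eq_true, List.erase_of_not_mem hm]
      exact ih _ hnd.of_cons

-- the counters dict built by B: every present front maps to 1
theorem counts_getD (S : List String) (d : PySem.Dict String Int) (x : String) :
    (S.foldl (fun d f => d.insert f 1) d).getD x 0 = if x ∈ S then 1 else d.getD x 0 := by
  induction S generalizing d with
  | nil => simp
  | cons s S ih =>
    simp only [List.foldl_cons, ih, PySem.Dict.getD_insert, List.mem_cons]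
    split_ifs with h1 h2 h3 h4 <;> tauto

-- recursive form of B's partition pass
def pvRemoveSet (c : PySem.Dict String Int) : List String → List String
  | [] => []
  | x :: xs =>
    if c.getD x 0 > 0 then pvRemoveSet (c.insert x (c.getD x 0 - 1)) xs
    else x :: pvRemoveSet c xs

theorem passB (l : List String) (c : PySem.Dict String Int) (acc : List String) :
    (l.foldl
      (fun (st : PySem.Dict String Int × List String) x =>
        let c := st.1.getD x 0
        if c > 0 then (st.1.insert x (c - 1), st.2) else (st.1, st.2 ++ [x]))
      (c, acc)).2 = acc ++ pvRemoveSet c l := by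
  induction l generalizing c acc with
  | nil => simp [pvRemoveSet]
  | cons x xs ih =>
    simp only [List.foldl_cons, pvRemoveSet]
    by_cases h : c.getD x 0 > 0
    · simp only [h, if_pos]
      exact ih _ _
    · simp only [h, if_neg, not_false_eq_true]
      rw [ih]
      simp

-- a 0/1-counter pass removes exactly the first occurrence of each active key
theorem removeSet_eq_foldl_erase (l : List String) (c : PySem.Dict String Int) (S : List String)
    (hnd : S.Nodup) (hc : ∀ x, c.getD x 0 = if x ∈ S then 1 else 0) :
    pvRemoveSet c l = S.foldl List.erase l := by
  induction l generalizing c S with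
  | nil => simp [pvRemoveSet, foldl_erase_nil]
  | cons x xs ih =>
    have hx := hc x
    by_cases hmem : x ∈ S
    · rw [if_pos hmem] at hx
      simp only [pvRemoveSet, hx]
      norm_num
      rw [foldl_erase_of_mem S x xs hnd hmem]
      apply ih _ (S.erase x) (hnd.erase x)
      intro y
      rw [PySem.Dict.getD_insert]
      by_cases hyx : y = x
      · subst hyx
        simp [List.Nodup.not_mem_erase hnd]
      · simp only [hyx, if_neg, not_false_eq_true, hc y]
        simp [hnd.mem_erase_iff, hyx]
    · rw [if_neg hmem] at hx
      simp only [pvRemoveSet, hx]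
      norm_num
      rw [foldl_erase_cons S x xs (fun s hs h => hmem (h ▸ hs))]
      exact congrArg _ (ih c S hnd hc)

theorem move_front_nodup : move_front.Nodup := by decide

-- ===== VERDICT (by name: the statement is the Claim_ definition above) =====
theorem move_to_front_spec : Claim_equal_move_to_front := by
  intro l _
  unfold Spec_move_to_front move_to_front move_to_front_alt
  dsimp only
  rw [foldA move_front l move_front_nodup]
  rw [foldl_erase_filter move_front l move_front_nodup]
  set fronts := move_front.filter (fun f => l.contains f) with hf
  have hndf : fronts.Nodup := move_front_nodup.filter _
  rw [passB]
  simp only [List.nil_append]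
  congr 1
  rw [removeSet_eq_foldl_erase l _ fronts hndf]
  intro x
  rw [counts_getD]
  simp
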